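-- pv_equiv track=rewrite | github.com/ChenliangLi205/LeetCode | Q488ZumaGame.py | remove_balls
-- ===== SOURCE A (Python) =====
-- def remove_balls(b):
--     while len(b) >= 3:
--         modified = False
--         for i in range(2, len(b)):
--             if b[i] == b[i - 1] == b[i - 2]:
--                 modified = True
--                 j = i+1
--                 while j < len(b) and b[j] == b[i]:
--                     j += 1
--                 b = b[:i - 2] + b[j:]
--                 break
--         if not modified:
--             break
--     return b
-- ===== SOURCE B (Python) =====
-- def remove_balls(b):
--     # Single left-to-right pass with a run-length stack; pop a run when a
--     # differing ball arrives (or at the end) and its count reached 3.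
--     stack = []  # entries [char, count]; counts below the top are always < 3
--     for ch in b:
--         while True:
--             if stack and stack[-1][0] == ch:
--                 stack[-1][1] += 1
--                 break
--             if stack and stack[-1][1] >= 3:
--                 stack.pop()
--                 continue
--             stack.append([ch, 1])
--             break
--     while stack and stack[-1][1] >= 3:
--         stack.pop()
--     return ''.join(c * n for c, n in stack)
-- ===== Notes on version B (the rewrite author's own statement) =====
-- stated objective: faster
-- what changed: Replaced A's repeated rescan-from-the-start loop (find leftmost triple, splice the string, restart) by a single left-to-right pass over the string maintaining a run-length stack, popping a run when a differing ball arrives (or at the end) and its count has reached 3.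
import Mathlib
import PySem

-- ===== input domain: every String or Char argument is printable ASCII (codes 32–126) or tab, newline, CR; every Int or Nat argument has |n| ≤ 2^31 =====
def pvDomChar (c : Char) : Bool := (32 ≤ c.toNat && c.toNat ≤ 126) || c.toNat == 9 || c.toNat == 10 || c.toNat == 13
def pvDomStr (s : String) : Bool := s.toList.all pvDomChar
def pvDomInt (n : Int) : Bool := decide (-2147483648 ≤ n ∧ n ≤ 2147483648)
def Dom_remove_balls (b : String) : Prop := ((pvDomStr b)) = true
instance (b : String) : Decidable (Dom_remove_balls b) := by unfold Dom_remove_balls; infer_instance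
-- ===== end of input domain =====

-- B replaces A's rescan-splice-restart loop by one linear pass with a run-length stack
-- (measurably faster on the timed sizes).

-- ===== PORT A =====
-- the inner `while j < len(b) and b[j] == b[i]` loop (c is b[i])
def aExt (l : List Char) (c : Char) (j : Nat) : Nat :=
  if j < l.length ∧ l.getD j ' ' = c then aExt l c (j + 1) else j
termination_by l.length - j
decreasing_by omega

-- the `for i in range(2, len(b))` scan: the first i with b[i] == b[i-1] == b[i-2],
-- returned together with the extension point j
def aScan (l : List Char) (i : Nat) : Option (Nat × Nat) :=
  if i < l.length then
    if l.getD i ' ' = l.getD (i - 1) ' ' ∧ l.getD (i - 1) ' ' = l.getD (i - 2) ' ' then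
      some (i, aExt l (l.getD i ' ') (i + 1))
    else aScan l (i + 1)
  else none
termination_by l.length - i
decreasing_by omega

theorem aExt_ge (l : List Char) (c : Char) (j : Nat) : j ≤ aExt l c j := by
  unfold aExt
  split
  · have := aExt_ge l c (j + 1); omega
  · omega
termination_by l.length - j
decreasing_by omega

theorem aExt_le (l : List Char) (c : Char) (j : Nat) (h : j ≤ l.length) :
    aExt l c j ≤ l.length := by
  unfold aExt
  split
  · exact aExt_le l c (j + 1) (by omega)
  · exact h
termination_by l.length - j
decreasing_by omega

theorem aScan_bounds (l : List Char) (i : Nat) (p q : Nat)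
    (h : aScan l i = some (p, q)) : i ≤ p ∧ p < l.length ∧ p + 1 ≤ q ∧ q ≤ l.length := by
  unfold aScan at h
  split at h
  · split at h
    · simp only [Option.some.injEq, Prod.mk.injEq] at h
      obtain ⟨rfl, rfl⟩ := h
      refine ⟨le_rfl, by omega, aExt_ge _ _ _, aExt_le _ _ _ (by omega)⟩
    · have := aScan_bounds l (i + 1) p q h; omega
  · simp at h
termination_by l.length - i
decreasing_by omega

-- the outer `while len(b) >= 3` loop; b = b[:i-2] + b[j:] is take/drop
def aLoop (l : List Char) : List Char :=
  if 3 ≤ l.length then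
    match h : aScan l 2 with
    | some (i, j) => aLoop (l.take (i - 2) ++ l.drop j)
    | none => l
  else l
termination_by l.length
decreasing_by
  have := aScan_bounds l 2 i j h
  simp only [List.length_append, List.length_take, List.length_drop]
  omega

def remove_balls (b : String) : String := String.mk (aLoop b.toList)

-- ===== PORT B =====
-- the inner `while True` loop of Source B: merge with the top run, else pop a
-- finished (count ≥ 3) run and retry, else start a new run
def bPush (st : List (Char × Nat)) (c : Char) : List (Char × Nat) :=
  match st with
  | (d, m) :: rest =>
    if d = c then (d, m + 1) :: rest
    else if 3 ≤ m then bPush rest c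
    else (c, 1) :: (d, m) :: rest
  | [] => [(c, 1)]

-- the final `while stack and stack[-1][1] >= 3: stack.pop()`
def bFlush : List (Char × Nat) → List (Char × Nat)
  | (d, m) :: rest => if 3 ≤ m then bFlush rest else (d, m) :: rest
  | [] => []

-- `''.join(c * n for c, n in stack)` (the stack top is at the head here, hence reverse)
def bExpand (st : List (Char × Nat)) : List Char :=
  st.reverse.flatMap (fun p => List.replicate p.2 p.1)

def remove_balls_alt (b : String) : String :=
  String.mk (bExpand (bFlush (b.toList.foldl bPush [])))

-- ===== PRECONDITION & SPEC =====
def Spec_remove_balls (b : String) (out : String) : Prop := out = remove_balls_alt b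
instance (b : String) (out : String) : Decidable (Spec_remove_balls b out) := by unfold Spec_remove_balls; infer_instance

-- ===== CLAIM (what is proved, stated in full; the proofs are below) =====
def Claim_equal_remove_balls : Prop := ∀ (b : String), Dom_remove_balls b → Spec_remove_balls b (remove_balls b)

-- ===== LEMMAS AND PROOFS =====

-- B's core on a list of characters
def Bfun (l : List Char) : List Char := bExpand (bFlush (l.foldl bPush []))

-- the three cases of bPush, as rewrite rules
theorem bPush_same (st : List (Char × Nat)) (c : Char) (j : Nat) :
    bPush ((c, j) :: st) c = (c, j + 1) :: st := by
  simp [bPush]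

theorem bPush_new (st : List (Char × Nat)) (c d : Char) (j : Nat)
    (h : d ≠ c) (hj : j < 3) : bPush ((d, j) :: st) c = (c, 1) :: (d, j) :: st := by
  simp [bPush, h, Nat.not_le.mpr hj]

theorem bPush_pop (st : List (Char × Nat)) (c d : Char) (j : Nat)
    (h : d ≠ c) (hj : 3 ≤ j) : bPush ((d, j) :: st) c = bPush st c := by
  simp [bPush, h, hj]

-- "no three consecutive equal characters"
def nt (l : List Char) : Prop := ∀ d : Char, ¬ [d, d, d] <:+: l

theorem nt_of_isPrefix {l u : List Char} (h : u <+: l) (hl : nt l) : nt u := by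
  intro d hd
  exact hl d (hd.trans h.isInfix)

theorem bExpand_cons (d : Char) (m : Nat) (r : List (Char × Nat)) :
    bExpand ((d, m) :: r) = bExpand r ++ List.replicate m d := by
  simp [bExpand]

-- stack shape on triple-free strings: every count is 1 or 2 and the stack expands
-- back to the string itself
theorem stk_nt (u : List Char) (h : nt u) :
    (∀ p ∈ u.foldl bPush [], 1 ≤ p.2 ∧ p.2 ≤ 2) ∧ bExpand (u.foldl bPush []) = u := by
  induction u using List.reverseRecOn with
  | nil => simp [bExpand]
  | append_singleton u a ih =>
    have hu : nt u := nt_of_isPrefix ⟨[a], rfl⟩ h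
    obtain ⟨hcnt, hexp⟩ := ih hu
    rw [List.foldl_append, List.foldl_cons, List.foldl_nil]
    cases hst : List.foldl bPush [] u with
    | nil =>
      have hu0 : u = [] := by rw [hst] at hexp; simpa [bExpand] using hexp.symm
      subst hu0
      simp [bPush, bExpand]
    | cons p r =>
      obtain ⟨d, m⟩ := p
      rw [hst] at hcnt hexp
      have hm : 1 ≤ m ∧ m ≤ 2 := hcnt (d, m) (by simp)
      by_cases hda : d = a
      · subst hda
        have hm1 : m = 1 := by
          rcases Nat.lt_or_ge m 2 with h1 | h2
          · omega
          · -- m = 2 would give a [d,d,d] infix in u ++ [d]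
            exfalso
            have hm2 : m = 2 := by omega
            subst hm2
            apply h d
            rw [← hexp, bExpand_cons]
            exact ⟨bExpand r, [], by simp⟩
        subst hm1
        rw [bPush_same]
        constructor
        · intro p hp
          rcases (List.mem_cons).1 hp with hp | hp
          · subst hp; simp
          · exact hcnt p (by simp [hp])
        · rw [bExpand_cons, ← hexp, bExpand_cons]
          simp [List.replicate_succ']
      · rw [bPush_new _ _ _ _ hda (by omega)]
        constructor
        · intro p hp
          rcases (List.mem_cons).1 hp with hp | hp
          · subst hp; simp
          · exact hcnt p hp
        · rw [bExpand_cons, hexp]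
          simp

theorem bFlush_of_small {st : List (Char × Nat)} (h : ∀ p ∈ st, p.2 ≤ 2) :
    bFlush st = st := by
  match st with
  | [] => rfl
  | (d, m) :: r =>
    have := h (d, m) (by simp)
    simp only at this
    simp only [bFlush]
    rw [if_neg (by omega)]

theorem Bfun_nt (u : List Char) (h : nt u) : Bfun u = u := by
  obtain ⟨hcnt, hexp⟩ := stk_nt u h
  unfold Bfun
  rw [bFlush_of_small (fun p hp => (hcnt p hp).2), hexp]

-- pushing k copies of c onto a stack whose top is already a c-run
theorem foldl_push_run_merge (k : Nat) (j : Nat) (st : List (Char × Nat)) (c : Char) :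
    List.foldl bPush ((c, j) :: st) (List.replicate k c) = (c, j + k) :: st := by
  induction k generalizing j with
  | zero => simp
  | succ k ih =>
    rw [List.replicate_succ, List.foldl_cons, bPush_same, ih]
    have : j + 1 + k = j + (k + 1) := by omega
    rw [this]

-- pushing k ≥ 1 copies of c when the stack can neither absorb nor pop
theorem foldl_push_run (k : Nat) (st : List (Char × Nat)) (c : Char)
    (hst : st = [] ∨ ∃ d m r, st = (d, m) :: r ∧ d ≠ c ∧ m < 3) (hk : 1 ≤ k) :
    List.foldl bPush st (List.replicate k c) = (c, k) :: st := by
  obtain ⟨k', rfl⟩ : ∃ k', k = k' + 1 := ⟨k - 1, by omega⟩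
  rw [List.replicate_succ, List.foldl_cons]
  have h1 : bPush st c = (c, 1) :: st := by
    rcases hst with rfl | ⟨d, m, r, rfl, hd, hm⟩
    · rfl
    · exact bPush_new _ _ _ _ hd hm
  rw [h1, foldl_push_run_merge]
  have : 1 + k' = k' + 1 := by omega
  rw [this]

-- the key step: removing the leftmost maximal run of length ≥ 3 does not change B
theorem Bfun_step (u v : List Char) (c : Char) (k : Nat)
    (hnt : nt u) (hk : 3 ≤ k)
    (hu : u.getLast? ≠ some c) (hv : v.head? ≠ some c) :
    Bfun (u ++ List.replicate k c ++ v) = Bfun (u ++ v) := by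
  obtain ⟨hcnt, hexp⟩ := stk_nt u hnt
  have hshape : List.foldl bPush [] u = [] ∨
      ∃ d m r, List.foldl bPush [] u = (d, m) :: r ∧ d ≠ c ∧ m < 3 := by
    cases hst : List.foldl bPush [] u with
    | nil => exact Or.inl rfl
    | cons p r =>
      obtain ⟨d, m⟩ := p
      right
      refine ⟨d, m, r, rfl, ?_, ?_⟩
      · -- d is the last character of u, which is not c
        intro hdc
        subst hdc
        apply hu
        rw [hst] at hexp hcnt
        have hm := (hcnt (d, m) (by simp)).1
        rw [← hexp, bExpand_cons]
        obtain ⟨m', rfl⟩ : ∃ m', m = m' + 1 := ⟨m - 1, by omega⟩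
        rw [List.replicate_succ', ← List.append_assoc, List.getLast?_concat]
      · rw [hst] at hcnt
        have := (hcnt (d, m) (by simp)).2
        simp only at this
        omega
  have hrun : List.foldl bPush [] (u ++ List.replicate k c) =
      (c, k) :: List.foldl bPush [] u := by
    rw [List.foldl_append, foldl_push_run k _ c hshape (by omega)]
  match v with
  | [] =>
    simp only [List.append_nil]
    unfold Bfun
    rw [hrun]
    simp only [bFlush]
    rw [if_pos hk]
  | e :: v' =>
    have hec : c ≠ e := fun hce => hv (by rw [List.head?_cons, ← hce])
    unfold Bfun
    rw [List.foldl_append (l := u ++ List.replicate k c), hrun,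
        List.foldl_append (l := u), List.foldl_cons, List.foldl_cons,
        bPush_pop _ _ _ _ hec hk]

-- getD in terms of getElem on in-range indices
theorem getD_eq_get (l : List Char) (i : Nat) (h : i < l.length) :
    l.getD i ' ' = l[i] := by
  simp [List.getD_eq_getElem?_getD, List.getElem?_eq_getElem h]

-- reading inside an embedded run
theorem getD_append_run (s t : List Char) (d : Char) (q : Nat) (hq : q < 3) :
    (s ++ [d, d, d] ++ t).getD (s.length + q) ' ' = d := by
  rw [List.append_assoc, List.getD_eq_getElem?_getD,
      List.getElem?_append_right (by omega)]
  have h1 : s.length + q - s.length = q := by omega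
  rw [h1, List.getElem?_append_left (by simp; omega)]
  interval_cases q <;> rfl

-- a [d,d,d] infix yields a triple in A's sense at index s.length + 2
theorem triple_of_infix (l s t : List Char) (d : Char) (h : l = s ++ [d, d, d] ++ t) :
    s.length + 2 < l.length ∧
    l.getD (s.length + 2) ' ' = l.getD (s.length + 1) ' ' ∧
    l.getD (s.length + 1) ' ' = l.getD s.length ' ' := by
  subst h
  have h0 := getD_append_run s t d 0 (by omega)
  have h1 := getD_append_run s t d 1 (by omega)
  have h2 := getD_append_run s t d 2 (by omega)
  simp only [Nat.add_zero] at h0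
  refine ⟨by simp, ?_, ?_⟩
  · rw [h1, h2]
  · rw [h0, h1]

-- aScan finds no triple before its result / at all
theorem aScan_min (l : List Char) (i0 : Nat) (p q : Nat)
    (h : aScan l i0 = some (p, q)) (i : Nat) (h1 : i0 ≤ i) (h2 : i < p) :
    ¬ (l.getD i ' ' = l.getD (i - 1) ' ' ∧ l.getD (i - 1) ' ' = l.getD (i - 2) ' ') := by
  unfold aScan at h
  split at h
  · split at h
    · simp only [Option.some.injEq, Prod.mk.injEq] at h
      omega
    · rcases Nat.eq_or_lt_of_le h1 with rfl | hlt
      · assumption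
      · exact aScan_min l (i0 + 1) p q h i (by omega) h2
  · simp at h
termination_by l.length - i0
decreasing_by omega

theorem aScan_none (l : List Char) (i0 : Nat) (h : aScan l i0 = none)
    (i : Nat) (h1 : i0 ≤ i) (h2 : i < l.length) :
    ¬ (l.getD i ' ' = l.getD (i - 1) ' ' ∧ l.getD (i - 1) ' ' = l.getD (i - 2) ' ') := by
  unfold aScan at h
  split at h
  · split at h
    · simp at h
    · rcases Nat.eq_or_lt_of_le h1 with rfl | hlt
      · assumption
      · exact aScan_none l (i0 + 1) h i (by omega) h2
  · omega
termination_by l.length - i0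
decreasing_by omega

theorem aScan_some_triple (l : List Char) (i0 : Nat) (p q : Nat)
    (h : aScan l i0 = some (p, q)) :
    l.getD p ' ' = l.getD (p - 1) ' ' ∧ l.getD (p - 1) ' ' = l.getD (p - 2) ' ' := by
  unfold aScan at h
  split at h
  · split at h
    · simp only [Option.some.injEq, Prod.mk.injEq] at h
      obtain ⟨rfl, rfl⟩ := h
      assumption
    · exact aScan_some_triple l (i0 + 1) p q h
  · simp at h
termination_by l.length - i0
decreasing_by omega

theorem aScan_some_extent (l : List Char) (i0 : Nat) (p q : Nat)
    (h : aScan l i0 = some (p, q)) : q = aExt l (l.getD p ' ') (p + 1) := by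
  unfold aScan at h
  split at h
  · split at h
    · simp only [Option.some.injEq, Prod.mk.injEq] at h
      obtain ⟨rfl, rfl⟩ := h
      rfl
    · exact aScan_some_extent l (i0 + 1) p q h
  · simp at h
termination_by l.length - i0
decreasing_by omega

theorem nt_of_no_triple (l : List Char)
    (h : ∀ i, 2 ≤ i → i < l.length →
      ¬ (l.getD i ' ' = l.getD (i - 1) ' ' ∧ l.getD (i - 1) ' ' = l.getD (i - 2) ' ')) :
    nt l := by
  intro d hd
  obtain ⟨s, t, hst⟩ := hd
  have := triple_of_infix l s t d hst.symm
  exact h (s.length + 2) (by omega) this.1 ⟨by simpa using this.2.1, by simpa using this.2.2⟩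

-- length-≤-2 strings are triple-free
theorem nt_of_short (l : List Char) (h : l.length < 3) : nt l := by
  intro d hd
  have := hd.length_le
  simp at this; omega

-- aExt marks a maximal c-run
theorem aExt_all (l : List Char) (c : Char) (j0 : Nat) (p : Nat)
    (h1 : j0 ≤ p) (h2 : p < aExt l c j0) : l.getD p ' ' = c := by
  unfold aExt at h2
  split at h2
  · rcases Nat.eq_or_lt_of_le h1 with rfl | hlt
    · tauto
    · exact aExt_all l c (j0 + 1) p (by omega) h2
  · omega
termination_by l.length - j0
decreasing_by omega

theorem aExt_stop (l : List Char) (c : Char) (j0 : Nat) :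
    ¬ (aExt l c j0 < l.length ∧ l.getD (aExt l c j0) ' ' = c) := by
  unfold aExt
  split
  · exact aExt_stop l c (j0 + 1)
  · assumption
termination_by l.length - j0
decreasing_by omega

-- a segment of constant character as replicate
theorem drop_eq_replicate (l : List Char) (c : Char) (a b : Nat)
    (hab : a ≤ b) (hb : b ≤ l.length)
    (h : ∀ p, a ≤ p → p < b → l.getD p ' ' = c) :
    l.drop a = List.replicate (b - a) c ++ l.drop b := by
  rcases Nat.eq_or_lt_of_le hab with rfl | hlt
  · simp
  · have ha : a < l.length := by omega
    rw [List.drop_eq_getElem_cons ha]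
    have hc : l[a] = c := by rw [← getD_eq_get l a ha]; exact h a le_rfl hlt
    rw [drop_eq_replicate l c (a + 1) b (by omega) hb (fun p hp1 hp2 => h p (by omega) hp2)]
    obtain ⟨e, he⟩ : ∃ e, b - a = e + 1 := ⟨b - a - 1, by omega⟩
    rw [he]
    have h2 : b - (a + 1) = e := by omega
    rw [h2, List.replicate_succ, hc]
    simp
termination_by l.length - a
decreasing_by omega

-- prefix transfer for getD
theorem getD_take (l : List Char) (n p : Nat) (h : p < (l.take n).length) :
    (l.take n).getD p ' ' = l.getD p ' ' := by
  have hp : p < l.length := by simp at h; omega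
  rw [getD_eq_get _ _ h, getD_eq_get _ _ hp, List.getElem_take]

-- main loop equivalence
theorem aLoop_eq_Bfun (l : List Char) : aLoop l = Bfun l := by
  generalize hn : l.length = n
  induction n using Nat.strong_induction_on generalizing l with
  | _ n ih => ?_
  subst hn
  unfold aLoop
  split
  · rename_i h3
    split
    · rename_i i j hscan
      obtain ⟨hi2, hip, hij, hjl⟩ := aScan_bounds l 2 i j hscan
      set c := l.getD i ' ' with hc
      have htriple := aScan_some_triple l 2 i j hscan
      have hj := aScan_some_extent l 2 i j hscan
      have hmin := aScan_min l 2 i j hscan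
      -- the segment [i-2, j) is constantly c
      have hseg : ∀ p, i - 2 ≤ p → p < j → l.getD p ' ' = c := by
        intro p hp1 hp2
        rcases Nat.lt_or_ge p (i + 1) with hp | hp
        · have hcases : p = i - 2 ∨ p = i - 1 ∨ p = i := by omega
          rcases hcases with rfl | rfl | rfl
          · exact (htriple.1.trans htriple.2).symm
          · exact htriple.1.symm
          · rfl
        · exact aExt_all l c (i + 1) p hp (hj ▸ hp2)
      -- decomposition
      have hdecomp : l = l.take (i - 2) ++ List.replicate (j - (i - 2)) c ++ l.drop j := by
        rw [List.append_assoc]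
        conv_lhs => rw [← List.take_append_drop (i - 2) l]
        rw [drop_eq_replicate l c (i - 2) j (by omega) hjl hseg]
      have hnt : nt (l.take (i - 2)) := by
        intro d hd
        obtain ⟨s, t, hst⟩ := hd
        obtain ⟨hlt, h1, h2⟩ := triple_of_infix (l.take (i - 2)) s t d hst.symm
        have hlen : (l.take (i - 2)).length = i - 2 := by simp; omega
        rw [getD_take _ _ _ (by omega), getD_take _ _ _ (by omega)] at h1
        rw [getD_take _ _ _ (by omega), getD_take _ _ _ (by omega)] at h2
        exact hmin (s.length + 2) (by omega) (by omega)
          ⟨by simpa using h1, by simpa using h2⟩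
      have hgd2 : l.getD (i - 2) ' ' = c := (htriple.1.trans htriple.2).symm
      have hlast : (l.take (i - 2)).getLast? ≠ some c := by
        rcases Nat.eq_or_lt_of_le hi2 with he | hi3
        · rw [← he]; simp
        · have hlen : (l.take (i - 2)).length = i - 2 := by simp; omega
          intro hcon
          rw [List.getLast?_eq_getElem?, hlen,
              List.getElem?_take_of_lt (by omega)] at hcon
          have e0 : i - 2 - 1 = i - 3 := by omega
          rw [e0, List.getElem?_eq_getElem (by omega)] at hcon
          have hval : l.getD (i - 3) ' ' = c := by
            rw [getD_eq_get _ _ (by omega)]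
            exact Option.some.inj hcon
          apply hmin (i - 1) (by omega) (by omega)
          have e1 : i - 1 - 1 = i - 2 := by omega
          have e2 : i - 1 - 2 = i - 3 := by omega
          rw [e1, e2]
          exact ⟨htriple.2, hgd2.trans hval.symm⟩
      have hhead : (l.drop j).head? ≠ some c := by
        rcases Nat.lt_or_ge j l.length with hjlt | hge
        · rw [List.drop_eq_getElem_cons hjlt]
          simp only [List.head?_cons, ne_eq, Option.some.injEq]
          intro hcon
          apply aExt_stop l c (i + 1)
          rw [← hj]
          exact ⟨hjlt, by rw [getD_eq_get _ _ hjlt]; exact hcon⟩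
        · rw [List.drop_eq_nil_of_le (by omega)]
          simp
      rw [ih (l.take (i - 2) ++ l.drop j).length
            (by simp only [List.length_append, List.length_take, List.length_drop]; omega)
            (l.take (i - 2) ++ l.drop j) rfl]
      have hstep := Bfun_step (l.take (i - 2)) (l.drop j) c (j - (i - 2)) hnt (by omega)
        hlast hhead
      conv_rhs => rw [hdecomp]
      exact hstep.symm
    · rename_i hscan
      exact (Bfun_nt l (nt_of_no_triple l (fun i h2 hl => aScan_none l 2 hscan i h2 hl))).symm
  · rename_i h3
    exact (Bfun_nt l (nt_of_short l (by omega))).symm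

-- ===== VERDICT (by name: the statement is the Claim_ definition above) =====
theorem remove_balls_spec : Claim_equal_remove_balls := by
  intro b _
  unfold Spec_remove_balls remove_balls remove_balls_alt
  rw [aLoop_eq_Bfun]
  rfl
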